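-- pv_equiv track=rewrite | github.com/alphaluf888/asu_cse578_assignments | assignment1/q4.py | find_skylines
-- ===== SOURCE A (Python) =====
-- def a_dominates_b(a, b):
--     if a[1] <= b[1] and a[2] >= b[2]:
--         return True
--     else:
--         return False
--
-- def find_skylines(rowsa, rowsb):
--     skylines = []
--     for row_a in rowsa:
--         is_dominated_by_others_flag = False
--         for row_b in rowsb:
--             if row_a[0] == row_b[0]:
--                 continue
--             if a_dominates_b(row_b, row_a) == True:
--                 is_dominated_by_others_flag = True
--                 break
--         if is_dominated_by_others_flag == False:
--             skylines.append(row_a[0])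
--     return skylines
-- ===== SOURCE B (Python) =====
-- def find_skylines(rowsa, rowsb):
--     # Sort rowsb by x, build prefix "top-two-distinct-ids by y" states, then
--     # answer each rowsa query with a hand-rolled binary search: O((n+m) log m).
--     sb = sorted(rowsb, key=lambda r: r[1])
--     xs = [r[1] for r in sb]
--     tops = []
--     cur = None  # (y1, id1, y2): y1 = max y of prefix, id1 its id, y2 = max y among ids != id1 (None if absent)
--     for r in sb:
--         rid, ry = r[0], r[2]
--         if cur is None:
--             cur = (ry, rid, None)
--         else:
--             y1, id1, y2 = cur
--             if rid == id1:
--                 cur = (max(y1, ry), id1, y2)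
--             elif ry > y1:
--                 cur = (ry, rid, y1)
--             else:
--                 cur = (y1, id1, ry if y2 is None else max(y2, ry))
--         tops.append(cur)
--     res = []
--     for a in rowsa:
--         lo, hi = 0, len(xs)
--         while lo < hi:
--             mid = (lo + hi) // 2
--             if xs[mid] <= a[1]:
--                 lo = mid + 1
--             else:
--                 hi = mid
--         if lo == 0:
--             res.append(a[0])
--         else:
--             y1, id1, y2 = tops[lo - 1]
--             best = y1 if id1 != a[0] else y2
--             if best is None or best < a[2]:
--                 res.append(a[0])
--     return res
-- ===== Notes on version B (the rewrite author's own statement) =====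
-- stated objective: alternative
-- what changed: A's nested per-row scan of rowsb is replaced by a different algorithm: sort rowsb by x once, build a prefix array of top-two-y-over-distinct-ids states, and answer each rowsa row with a binary search (measured only ~1.2x faster on the generated inputs since A's inner loop breaks early, so no speed is claimed).
-- outside the precondition, e.g. on find_skylines([[1]], []): A returns [1], B returns [1]; on find_skylines([], [[1]]): A returns [], B raises IndexError
import Mathlib
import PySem

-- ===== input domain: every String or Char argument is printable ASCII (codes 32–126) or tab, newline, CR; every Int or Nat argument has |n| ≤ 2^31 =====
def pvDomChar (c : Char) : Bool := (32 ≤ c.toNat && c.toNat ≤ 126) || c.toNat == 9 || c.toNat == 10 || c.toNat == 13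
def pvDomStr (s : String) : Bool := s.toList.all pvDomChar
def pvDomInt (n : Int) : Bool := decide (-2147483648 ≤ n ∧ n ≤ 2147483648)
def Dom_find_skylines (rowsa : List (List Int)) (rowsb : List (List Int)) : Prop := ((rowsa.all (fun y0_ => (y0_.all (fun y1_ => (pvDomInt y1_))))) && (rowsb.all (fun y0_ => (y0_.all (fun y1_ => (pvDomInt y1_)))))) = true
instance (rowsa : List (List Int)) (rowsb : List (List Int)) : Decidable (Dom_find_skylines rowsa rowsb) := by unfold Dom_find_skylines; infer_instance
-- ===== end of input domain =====

-- B replaces A's nested scan by sorting rowsb by x, prefix "top-two y over distinct ids"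
-- states, and a per-query binary search; the return value is proved equal on Pre_.

-- ===== PORT A =====
def a_dominates_b (a : List Int) (b : List Int) : Bool :=
  if PySem.List.pyGetD a 1 0 ≤ PySem.List.pyGetD b 1 0 ∧ PySem.List.pyGetD a 2 0 ≥ PySem.List.pyGetD b 2 0 then
    true
  else
    false

-- the inner 'for row_b in rowsb' loop with continue/break
def fsInner (row_a : List Int) : List (List Int) → Bool
  | [] => false
  | row_b :: rest =>
    if PySem.List.pyGetD row_a 0 0 = PySem.List.pyGetD row_b 0 0 then fsInner row_a rest
    else if a_dominates_b row_b row_a = true then true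
    else fsInner row_a rest

def find_skylines (rowsa : List (List Int)) (rowsb : List (List Int)) : List Int :=
  rowsa.foldl (fun skylines row_a =>
    if fsInner row_a rowsb = false then skylines ++ [PySem.List.pyGetD row_a 0 0]
    else skylines) []

-- ===== PORT B =====
-- one step of B's running (y1, id1, y2) state (Python cur; None ↦ none)
def topStep (cur : Option (Int × Int × Option Int)) (r : List Int) : Int × Int × Option Int :=
  let rid := PySem.List.pyGetD r 0 0
  let ry := PySem.List.pyGetD r 2 0
  match cur with
  | none => (ry, rid, none)
  | some (y1, id1, y2) =>
    if rid = id1 then (max y1 ry, id1, y2)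
    else if ry > y1 then (ry, rid, some y1)
    else (y1, id1, some (match y2 with | none => ry | some v => max v ry))

-- the 'for r in sb: … tops.append(cur)' loop
def topsOf (cur : Option (Int × Int × Option Int)) : List (List Int) → List (Int × Int × Option Int)
  | [] => []
  | r :: rest => let c := topStep cur r; c :: topsOf (some c) rest

-- the hand-written 'while lo < hi' binary search of Source B
def bsLoop (xs : List Int) (t : Int) (lo hi : Int) : Int :=
  if h : lo < hi then
    let mid := PySem.Int.floordiv (lo + hi) 2
    if PySem.List.pyGetD xs mid 0 ≤ t then bsLoop xs t (mid + 1) hi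
    else bsLoop xs t lo mid
  else lo
termination_by (hi - lo).toNat
decreasing_by
  · have := PySem.Int.floordiv_two_mid_bounds (le_of_lt h)
    omega
  · have : PySem.Int.floordiv (lo + hi) 2 < hi := by
      rw [PySem.Int.floordiv_lt_iff_lt_mul (by norm_num)]; omega
    have := PySem.Int.floordiv_two_mid_bounds (le_of_lt h)
    omega

def find_skylines_alt (rowsa : List (List Int)) (rowsb : List (List Int)) : List Int :=
  let sb := PySem.List.sorted rowsb (fun r => PySem.List.pyGetD r 1 0) false
  let xs := sb.map (fun r => PySem.List.pyGetD r 1 0)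
  let tops := topsOf none sb
  rowsa.foldl (fun res a =>
    let lo := bsLoop xs (PySem.List.pyGetD a 1 0) 0 (xs.length : Int)
    if lo = 0 then res ++ [PySem.List.pyGetD a 0 0]
    else
      let s := PySem.List.pyGetD tops (lo - 1) (0, 0, none)
      let best : Option Int := if s.2.1 ≠ PySem.List.pyGetD a 0 0 then some s.1 else s.2.2
      match best with
      | none => res ++ [PySem.List.pyGetD a 0 0]
      | some v => if v < PySem.List.pyGetD a 2 0 then res ++ [PySem.List.pyGetD a 0 0] else res) []

-- ===== PRECONDITION & SPEC =====
-- Pre_ excludes rows shorter than 3 entries, on which A's row[0]/row[1]/row[2] indexing raises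
-- IndexError; it is slightly narrower than A's exact domain: on a few degenerate inputs
-- (e.g. rowsb = [] with short rowsa rows) A never reaches the indexing and still returns.
def Pre_find_skylines (rowsa : List (List Int)) (rowsb : List (List Int)) : Prop :=
  (∀ r ∈ rowsa, 3 ≤ r.length) ∧ (∀ r ∈ rowsb, 3 ≤ r.length)
instance (rowsa : List (List Int)) (rowsb : List (List Int)) : Decidable (Pre_find_skylines rowsa rowsb) := by unfold Pre_find_skylines; infer_instance

def pvWitness_find_skylines : List (List Int) × List (List Int) :=
  ([[1, 2, 3], [2, 0, 5]], [[2, 0, 5], [3, 4, 4]])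

def Spec_find_skylines (rowsa : List (List Int)) (rowsb : List (List Int)) (out : List Int) : Prop := out = find_skylines_alt rowsa rowsb
instance (rowsa : List (List Int)) (rowsb : List (List Int)) (out : List Int) : Decidable (Spec_find_skylines rowsa rowsb out) := by unfold Spec_find_skylines; infer_instance

-- ===== CLAIM (what is proved, stated in full; the proofs are below) =====
def Claim_equal_find_skylines : Prop := ∀ (rowsa : List (List Int)) (rowsb : List (List Int)), Dom_find_skylines rowsa rowsb → Pre_find_skylines rowsa rowsb → Spec_find_skylines rowsa rowsb (find_skylines rowsa rowsb)

-- ===== LEMMAS AND PROOFS =====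

-- shorthands for the three fields of a row (as both ports read them)
def rid0 (r : List Int) : Int := PySem.List.pyGetD r 0 0
def rx1 (r : List Int) : Int := PySem.List.pyGetD r 1 0
def ry2 (r : List Int) : Int := PySem.List.pyGetD r 2 0

-- A's inner loop: some row of bs with a different id dominates row a
lemma fsInner_iff (a : List Int) (bs : List (List Int)) :
    fsInner a bs = true ↔ ∃ b ∈ bs, rid0 b ≠ rid0 a ∧ rx1 b ≤ rx1 a ∧ ry2 a ≤ ry2 b := by
  induction bs with
  | nil => simp [fsInner]
  | cons b rest ih =>
    simp only [fsInner, a_dominates_b, rid0, rx1, ry2] at *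
    split_ifs with h1 h2 <;> simp_all <;> tauto

-- one unfolding of the binary-search loop
lemma bsLoop_step (xs : List Int) (t lo hi : Int) (h : lo < hi) :
    bsLoop xs t lo hi =
      if PySem.List.pyGetD xs (PySem.Int.floordiv (lo + hi) 2) 0 ≤ t then
        bsLoop xs t (PySem.Int.floordiv (lo + hi) 2 + 1) hi
      else bsLoop xs t lo (PySem.Int.floordiv (lo + hi) 2) := by
  rw [bsLoop]; simp [h]

-- binary-search loop invariant: on a sorted xs it computes the number of entries ≤ t
lemma bsLoop_general (xs : List Int) (t : Int) (hs : xs.Pairwise (· ≤ ·)) :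
    ∀ (n : Nat) (lo hi : Int), (hi - lo).toNat ≤ n → 0 ≤ lo → lo ≤ hi → hi ≤ (xs.length : Int) →
    (∀ (j : Nat) (hj : j < xs.length), (j : Int) < lo → xs[j] ≤ t) →
    (∀ (j : Nat) (hj : j < xs.length), hi ≤ (j : Int) → t < xs[j]) →
    ∃ k : Nat, bsLoop xs t lo hi = (k : Int) ∧ lo ≤ (k : Int) ∧ (k : Int) ≤ hi ∧
      ∀ (j : Nat) (hj : j < xs.length), (j < k ↔ xs[j] ≤ t) := by
  have hmono := List.pairwise_iff_getElem.1 hs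
  intro n
  induction n with
  | zero =>
    intro lo hi hfuel h0 hlohi hhi hinv1 hinv2
    have : lo = hi := by omega
    subst this
    rw [bsLoop, dif_neg (lt_irrefl lo)]
    refine ⟨lo.toNat, by omega, by omega, by omega, ?_⟩
    intro j hj
    constructor
    · intro hjk; exact hinv1 j hj (by omega)
    · intro hle; by_contra hk
      exact absurd hle (not_le.2 (hinv2 j hj (by omega)))
  | succ n ih =>
    intro lo hi hfuel h0 hlohi hhi hinv1 hinv2
    by_cases hlt : lo < hi
    · rw [bsLoop_step xs t lo hi hlt]
      have hmid := PySem.Int.floordiv_two_mid_bounds (le_of_lt hlt)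
      have hmidlt : PySem.Int.floordiv (lo + hi) 2 < hi := by
        rw [PySem.Int.floordiv_lt_iff_lt_mul (by norm_num)]; omega
      set mid := PySem.Int.floordiv (lo + hi) 2 with hmiddef
      have hmidrange : mid.toNat < xs.length := by omega
      have hget : PySem.List.pyGetD xs mid 0 = xs[mid.toNat] :=
        PySem.List.pyGetD_eq_getElem _ _ (by omega) (by push_cast; omega)
      rw [hget]
      split_ifs with hc
      · obtain ⟨k, hk1, hk2, hk3, hk4⟩ := ih (mid + 1) hi (by omega) (by omega) (by omega) hhi
          (by
            intro j hj hjlt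
            rcases lt_or_ge j mid.toNat with h' | h'
            · exact le_trans (hmono j mid.toNat hj hmidrange h') hc
            · have : j = mid.toNat := by omega
              subst this; exact hc)
          hinv2
        exact ⟨k, hk1, by omega, hk3, hk4⟩
      · obtain ⟨k, hk1, hk2, hk3, hk4⟩ := ih lo mid (by omega) h0 (by omega) (by omega) hinv1
          (by
            intro j hj hle
            rcases lt_or_ge mid.toNat j with h' | h'
            · exact lt_of_lt_of_le (not_le.1 hc) (hmono mid.toNat j hmidrange hj h')
            · have : j = mid.toNat := by omega
              subst this; exact not_le.1 hc)
        exact ⟨k, hk1, hk2, by omega, hk4⟩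
    · rw [bsLoop, dif_neg hlt]
      have : lo = hi := by omega
      subst this
      refine ⟨lo.toNat, by omega, by omega, by omega, ?_⟩
      intro j hj
      constructor
      · intro hjk; exact hinv1 j hj (by omega)
      · intro hle; by_contra hk
        exact absurd hle (not_le.2 (hinv2 j hj (by omega)))

lemma bsLoop_spec (xs : List Int) (t : Int) (hs : xs.Pairwise (· ≤ ·)) :
    ∃ k : Nat, bsLoop xs t 0 (xs.length : Int) = (k : Int) ∧ k ≤ xs.length ∧
      ∀ (j : Nat) (hj : j < xs.length), (j < k ↔ xs[j] ≤ t) := by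
  obtain ⟨k, h1, h2, h3, h4⟩ := bsLoop_general xs t hs (xs.length) 0 (xs.length : Int)
    (by omega) le_rfl (by positivity) le_rfl
    (fun j hj hjlt => by omega) (fun j hj hle => by exfalso; omega)
  exact ⟨k, h1, by exact_mod_cast h3, h4⟩

-- invariant of B's running state over a processed prefix p
def TopInv (p : List (List Int)) (s : Int × Int × Option Int) : Prop :=
  (∀ r ∈ p, ry2 r ≤ s.1) ∧
  (∃ r ∈ p, rid0 r = s.2.1 ∧ ry2 r = s.1) ∧
  (∀ r ∈ p, rid0 r ≠ s.2.1 → ∃ v, s.2.2 = some v ∧ ry2 r ≤ v) ∧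
  (∀ v, s.2.2 = some v → ∃ r ∈ p, rid0 r ≠ s.2.1 ∧ ry2 r = v)

lemma topStep_none_inv (r : List Int) : TopInv [r] (topStep none r) := by
  simp [TopInv, topStep, rid0, ry2]

lemma topStep_some_inv (p : List (List Int)) (s : Int × Int × Option Int) (r : List Int)
    (h : TopInv p s) : TopInv (p ++ [r]) (topStep (some s) r) := by
  obtain ⟨y1, id1, y2⟩ := s
  obtain ⟨h1, ⟨w, hw, hwid, hwy⟩, h3, h4⟩ := h
  have hr0 : PySem.List.pyGetD r 0 0 = rid0 r := rfl
  have hr2 : PySem.List.pyGetD r 2 0 = ry2 r := rfl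
  simp only [topStep, hr0, hr2]
  split_ifs with hid hgt
  · -- rid = id1
    refine ⟨?_, ?_, ?_, ?_⟩
    · intro r' hr'; rcases List.mem_append.1 hr' with h' | h'
      · exact le_trans (h1 r' h') (le_max_left _ _)
      · simp at h'; subst h'; exact le_max_right _ _
    · rcases max_cases y1 (ry2 r) with ⟨he, _⟩ | ⟨he, hlt⟩
      · exact ⟨w, by simp [hw], hwid, by simp [he, hwy]⟩
      · exact ⟨r, by simp, by simp [hid], by simp [he]⟩
    · intro r' hr' hne; rcases List.mem_append.1 hr' with h' | h'
      · exact h3 r' h' hne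
      · simp at h'; subst h'; exact absurd hid hne
    · intro v hv; obtain ⟨r', hr', hne, hy⟩ := h4 v hv
      exact ⟨r', List.mem_append.2 (Or.inl hr'), hne, hy⟩
  · -- rid ≠ id1, ry > y1
    refine ⟨?_, ⟨r, by simp, rfl, rfl⟩, ?_, ?_⟩
    · intro r' hr'; rcases List.mem_append.1 hr' with h' | h'
      · exact le_trans (h1 r' h') (le_of_lt hgt)
      · simp at h'; subst h'; exact le_rfl
    · intro r' hr' hne; rcases List.mem_append.1 hr' with h' | h'
      · exact ⟨y1, rfl, h1 r' h'⟩
      · simp at h'; subst h'; exact absurd rfl hne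
    · intro v hv
      have hv' : v = y1 := by simpa using hv.symm
      subst hv'
      exact ⟨w, List.mem_append.2 (Or.inl hw), by rw [hwid]; exact fun e => hid e.symm, hwy⟩
  · -- rid ≠ id1, ry ≤ y1
    replace hgt : ry2 r ≤ y1 := not_lt.1 hgt
    refine ⟨?_, ⟨w, List.mem_append.2 (Or.inl hw), hwid, hwy⟩, ?_, ?_⟩
    · intro r' hr'; rcases List.mem_append.1 hr' with h' | h'
      · exact h1 r' h'
      · simp at h'; subst h'; exact hgt
    · intro r' hr' hne; rcases List.mem_append.1 hr' with h' | h'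
      · obtain ⟨v, hv, hle⟩ := h3 r' h' hne
        cases y2 with
        | none => simp at hv
        | some u =>
          have : v = u := by simpa using hv.symm
          subst this
          exact ⟨max v (ry2 r), rfl, le_trans hle (le_max_left _ _)⟩
      · simp at h'; subst h'
        cases y2 with
        | none => exact ⟨ry2 r', rfl, le_rfl⟩
        | some u => exact ⟨max u (ry2 r'), rfl, le_max_right _ _⟩
    · intro v hv
      cases y2 with
      | none =>
        have : v = ry2 r := by simpa using hv.symm
        subst this
        exact ⟨r, by simp, hid, rfl⟩
      | some u =>
        have hvm : v = max u (ry2 r) := by simpa using hv.symm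
        rcases max_cases u (ry2 r) with ⟨he, _⟩ | ⟨he, _⟩
        · obtain ⟨r', hr', hne, hy⟩ := h4 u rfl
          exact ⟨r', List.mem_append.2 (Or.inl hr'), hne, by rw [hy, hvm, he]⟩
        · exact ⟨r, by simp, hid, by rw [hvm, he]⟩

lemma topsOf_length (cur : Option (Int × Int × Option Int)) (l : List (List Int)) :
    (topsOf cur l).length = l.length := by
  induction l generalizing cur with
  | nil => simp [topsOf]
  | cons r rest ih => simp [topsOf, ih]

def StInv (p : List (List Int)) : Option (Int × Int × Option Int) → Prop
  | none => p = []
  | some s => TopInv p s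

-- the i-th entry of topsOf is a valid state for the prefix of length i+1
lemma topsOf_getElem (l : List (List Int)) :
    ∀ (p : List (List Int)) (cur : Option (Int × Int × Option Int)), StInv p cur →
    ∀ (i : Nat) (hi : i < (topsOf cur l).length),
      TopInv (p ++ l.take (i + 1)) ((topsOf cur l)[i]) := by
  induction l with
  | nil => intro p cur _ i hi; simp [topsOf] at hi
  | cons r rest ih =>
    intro p cur hcur i hi
    have hstep : TopInv (p ++ [r]) (topStep cur r) := by
      cases cur with
      | none =>
        have hp : p = [] := hcur
        subst hp
        simpa using topStep_none_inv r
      | some s => exact topStep_some_inv p s r hcur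
    cases i with
    | zero => simpa [topsOf] using hstep
    | succ i =>
      have := ih (p ++ [r]) (some (topStep cur r)) hstep i (by
        simp [topsOf] at hi ⊢; omega)
      simpa [topsOf, List.append_assoc] using this

-- query correctness: B's 'best' answers "max y among prefix rows with id ≠ q"
lemma topInv_query (p : List (List Int)) (s : Int × Int × Option Int)
    (h : TopInv p s) (q z : Int) :
    ((∃ r ∈ p, rid0 r ≠ q ∧ z ≤ ry2 r) ↔
      (∃ v, (if s.2.1 ≠ q then some s.1 else s.2.2) = some v ∧ z ≤ v)) := by
  obtain ⟨h1, ⟨w, hw, hwid, hwy⟩, h3, h4⟩ := h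
  constructor
  · rintro ⟨r, hr, hne, hz⟩
    by_cases hq : s.2.1 ≠ q
    · exact ⟨s.1, by simp [hq], le_trans hz (h1 r hr)⟩
    · push_neg at hq
      obtain ⟨v, hv, hle⟩ := h3 r hr (by rw [hq]; exact hne)
      exact ⟨v, by simp [hq, hv], le_trans hz hle⟩
  · rintro ⟨v, hv, hz⟩
    by_cases hq : s.2.1 ≠ q
    · have : v = s.1 := by simp [hq] at hv; omega
      subst this
      exact ⟨w, hw, by rw [hwid]; exact hq, hwy ▸ hz⟩
    · push_neg at hq
      simp [hq] at hv
      obtain ⟨r, hr, hne, hy⟩ := h4 v hv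
      exact ⟨r, hr, by rw [← hq]; exact hne, hy ▸ hz⟩

-- restricting the domination search to the binary-search prefix loses nothing
lemma exists_take_iff (sb : List (List Int)) (k : Nat) (t q z : Int)
    (hkle : k ≤ sb.length)
    (hiff : ∀ (j : Nat) (hj : j < sb.length), (j < k ↔ rx1 sb[j] ≤ t)) :
    (∃ r ∈ sb, rx1 r ≤ t ∧ rid0 r ≠ q ∧ z ≤ ry2 r) ↔
      (∃ r ∈ sb.take k, rid0 r ≠ q ∧ z ≤ ry2 r) := by
  constructor
  · rintro ⟨r, hr, hxt, hne, hz⟩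
    obtain ⟨j, hj, rfl⟩ := List.mem_iff_getElem.1 hr
    have hjk : j < k := (hiff j hj).2 hxt
    refine ⟨sb[j], ?_, hne, hz⟩
    have hjt : j < (sb.take k).length := by simp [List.length_take]; omega
    have : (sb.take k)[j] = sb[j] := List.getElem_take
    exact this ▸ List.getElem_mem hjt
  · rintro ⟨r, hr, hne, hz⟩
    obtain ⟨j, hj, hjr⟩ := List.mem_iff_getElem.1 hr
    have hjlen : j < sb.length := by simp [List.length_take] at hj; omega
    have hjk : j < k := by simp [List.length_take] at hj; omega
    have heq : (sb.take k)[j] = sb[j] := List.getElem_take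
    rw [heq] at hjr
    subst hjr
    exact ⟨sb[j], List.getElem_mem hjlen, (hiff j hjlen).1 hjk, hne, hz⟩

-- main per-row lemma: B's loop body equals A's
lemma step_eq (rowsb : List (List Int)) (res a : List Int) :
    (let sb := PySem.List.sorted rowsb (fun r => PySem.List.pyGetD r 1 0) false
     let xs := sb.map (fun r => PySem.List.pyGetD r 1 0)
     let tops := topsOf none sb
     let lo := bsLoop xs (PySem.List.pyGetD a 1 0) 0 (xs.length : Int)
     if lo = 0 then res ++ [PySem.List.pyGetD a 0 0]
     else
       let s := PySem.List.pyGetD tops (lo - 1) (0, 0, none)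
       let best : Option Int := if s.2.1 ≠ PySem.List.pyGetD a 0 0 then some s.1 else s.2.2
       match best with
       | none => res ++ [PySem.List.pyGetD a 0 0]
       | some v => if v < PySem.List.pyGetD a 2 0 then res ++ [PySem.List.pyGetD a 0 0] else res) =
    (if fsInner a rowsb = false then res ++ [PySem.List.pyGetD a 0 0] else res) := by
  set sb := PySem.List.sorted rowsb (fun r => PySem.List.pyGetD r 1 0) false with hsb
  obtain ⟨k, hk, hkle, hiff⟩ := bsLoop_spec (sb.map (fun r => PySem.List.pyGetD r 1 0))
    (PySem.List.pyGetD a 1 0)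
    (by rw [hsb]; exact PySem.List.sorted_map_key_pairwise rowsb _)
  have hlen : (sb.map (fun r => PySem.List.pyGetD r 1 0)).length = sb.length := by
    simp
  have hkle' : k ≤ sb.length := hlen ▸ hkle
  have hiff' : ∀ (j : Nat) (hj : j < sb.length), (j < k ↔ rx1 sb[j] ≤ rx1 a) := by
    intro j hj
    have hj' : j < (sb.map (fun r => PySem.List.pyGetD r 1 0)).length := hlen ▸ hj
    have hje : (sb.map (fun r => PySem.List.pyGetD r 1 0))[j] = rx1 sb[j] := by
      simp [rx1]
    exact hje ▸ hiff j hj'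
  -- A's condition as an existential over the k-prefix of sb
  have hA : fsInner a rowsb = true ↔ (∃ r ∈ sb.take k, rid0 r ≠ rid0 a ∧ ry2 a ≤ ry2 r) := by
    rw [fsInner_iff]
    rw [← exists_take_iff sb k (rx1 a) (rid0 a) (ry2 a) hkle' hiff']
    constructor
    · rintro ⟨b, hb, h1, h2, h3⟩
      refine ⟨b, ?_, h2, h1, h3⟩
      rw [hsb]; exact (PySem.List.mem_sorted rowsb _ false b).2 hb
    · rintro ⟨b, hb, h1, h2, h3⟩
      refine ⟨b, ?_, h2, h1, h3⟩
      rw [hsb] at hb; exact (PySem.List.mem_sorted rowsb _ false b).1 hb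
  have hk2 : bsLoop (sb.map (fun r => PySem.List.pyGetD r 1 0)) (PySem.List.pyGetD a 1 0) 0
      ((sb.map (fun r => PySem.List.pyGetD r 1 0)).length : Int) = (k : Int) := hk
  simp only [hk2]
  by_cases hk0 : k = 0
  · subst hk0
    have hAe : fsInner a rowsb = false := by
      rw [Bool.eq_false_iff]
      intro hT
      obtain ⟨r, hr, -⟩ := hA.1 hT
      simp at hr
    rw [hAe]
    simp
  · have hknz : ¬ ((k : Int) = 0) := by exact_mod_cast hk0
    rw [if_neg hknz]
    have hidx : (k : Int) - 1 = ((k - 1 : Nat) : Int) := by omega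
    have hklen : k - 1 < (topsOf none sb).length := by rw [topsOf_length]; omega
    have hgets : PySem.List.pyGetD (topsOf none sb) ((k : Int) - 1) (0, 0, none) =
        (topsOf none sb)[k - 1] := by
      rw [hidx, PySem.List.pyGetD_natCast]
      exact List.getD_eq_getElem _ _ hklen
    simp only [hgets]
    have hinv : TopInv (sb.take k) ((topsOf none sb)[k - 1]) := by
      have := topsOf_getElem sb [] none rfl (k - 1) hklen
      have hk1 : k - 1 + 1 = k := by omega
      simpa [hk1] using this
    have hq := topInv_query (sb.take k) ((topsOf none sb)[k - 1]) hinv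
      (PySem.List.pyGetD a 0 0) (PySem.List.pyGetD a 2 0)
    set s := (topsOf none sb)[k - 1] with hsdef
    have hA' : fsInner a rowsb = true ↔
        (∃ v, (if s.2.1 ≠ PySem.List.pyGetD a 0 0 then some s.1 else s.2.2) = some v ∧
          PySem.List.pyGetD a 2 0 ≤ v) := by
      rw [hA]
      exact (by simpa [rid0, ry2] using hq)
    cases hbest : (if s.2.1 ≠ PySem.List.pyGetD a 0 0 then some s.1 else s.2.2) with
    | none =>
      have hAe : fsInner a rowsb = false := by
        rw [Bool.eq_false_iff]
        intro hT
        obtain ⟨v, hv, -⟩ := hA'.1 hT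
        rw [hbest] at hv
        simp at hv
      rw [hAe]
      simp
    | some v =>
      by_cases hvz : v < PySem.List.pyGetD a 2 0
      · have hAe : fsInner a rowsb = false := by
          rw [Bool.eq_false_iff]
          intro hT
          obtain ⟨v', hv', hz'⟩ := hA'.1 hT
          rw [hbest] at hv'
          have : v' = v := by simpa using hv'.symm
          subst this
          omega
        rw [hAe]
        simp [if_pos hvz]
      · have hAe : fsInner a rowsb = true := hA'.2 ⟨v, hbest, by omega⟩
        rw [hAe]
        simp [if_neg hvz]

-- ===== VERDICT (by name: the statement is the Claim_ definition above) =====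
theorem find_skylines_spec : Claim_equal_find_skylines := by
  intro rowsa rowsb _ _
  show find_skylines rowsa rowsb = find_skylines_alt rowsa rowsb
  unfold find_skylines find_skylines_alt
  refine PySem.List.foldl_congr_mem rowsa _ _ [] ?_
  intro acc x _
  exact (step_eq rowsb acc x).symm
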